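-- pv_equiv track=rewrite | github.com/takumiw/AtCoder | ABC116/C.py | split_by_zero
-- ===== SOURCE A (Python) =====
-- def split_by_zero(l):
--     if 0 not in l:
--         return [l]
--     ret_l = []
--     while 0 in l:
--         idx = l.index(0)
--         if l[:idx]:
--             ret_l.append(l[:idx])
--         l = l[idx+1:]
--     if l:
--         ret_l.append(l)
--     return ret_l
-- ===== SOURCE B (Python) =====
-- def split_by_zero(l):
--     ret = []
--     cur = []
--     for x in l:
--         if x == 0:
--             if cur:
--                 ret.append(cur)
--                 cur = []
--         else:
--             cur.append(x)
--     if cur: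
--         ret.append(cur)
--     return ret
-- ===== Notes on version B (the rewrite author's own statement) =====
-- stated objective: alternative
-- what changed: Replaced the repeated 'while 0 in l: l.index(0); slice' scan-and-copy passes with one element-by-element pass that accumulates the current run and flushes it on zeros.
-- intended difference: On the empty list A's '0 not in l' fast path returns [[]] (a list containing an empty run), while B returns [], the intended value since an empty list has no nonzero runs and A itself never emits empty runs anywhere else. — e.g. on split_by_zero([]): A returns [[]], B returns []
import Mathlib
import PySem

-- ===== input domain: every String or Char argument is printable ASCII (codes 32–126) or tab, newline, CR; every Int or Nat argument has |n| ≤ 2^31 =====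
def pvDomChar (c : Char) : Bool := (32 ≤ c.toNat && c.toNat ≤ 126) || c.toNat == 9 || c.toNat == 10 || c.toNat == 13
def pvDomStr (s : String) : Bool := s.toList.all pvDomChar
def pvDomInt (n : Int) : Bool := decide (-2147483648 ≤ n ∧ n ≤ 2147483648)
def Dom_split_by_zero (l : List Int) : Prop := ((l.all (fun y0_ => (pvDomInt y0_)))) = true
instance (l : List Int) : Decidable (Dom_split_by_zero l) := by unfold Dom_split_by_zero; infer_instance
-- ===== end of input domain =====

-- B replaces A's repeated index-and-slice passes with a single element-by-element run-accumulating
-- pass (objective: alternative); on the empty list A returns [[]], B returns the intended [].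


-- ===== PORT A =====
-- the 'while 0 in l' loop: each iteration finds the first 0, appends the (nonempty) prefix,
-- and continues on the suffix after that 0; on exit appends the zero-free remainder if nonempty
def splitA_loop (l : List Int) (ret : List (List Int)) : List (List Int) :=
  if h : (0 : Int) ∈ l then
    let idx := l.idxOf 0
    splitA_loop (l.drop (idx + 1))
      (if l.take idx ≠ [] then ret ++ [l.take idx] else ret)
  else
    if l ≠ [] then ret ++ [l] else ret
termination_by l.length
decreasing_by
  have : l ≠ [] := by intro hnil; simp [hnil] at h
  have : 0 < l.length := List.length_pos_iff.mpr this
  simp [List.length_drop]; omega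

def split_by_zero (l : List Int) : List (List Int) :=
  if (0 : Int) ∉ l then [l]
  else splitA_loop l []

-- ===== PORT B =====
-- one pass: accumulate the current run 'cur', flush it to 'ret' on each zero, flush once at the end
def split_by_zero_alt (l : List Int) : List (List Int) :=
  let p := l.foldl
    (fun (p : List (List Int) × List Int) x =>
      if x = 0 then (if p.2 ≠ [] then (p.1 ++ [p.2], ([] : List Int)) else p)
      else (p.1, p.2 ++ [x]))
    ([], [])
  if p.2 ≠ [] then p.1 ++ [p.2] else p.1

-- ===== PRECONDITION & SPEC =====
-- On the empty list A returns [[]] (its '0 not in l' fast path wraps the empty list itself),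
-- while B returns [], the intended value: there are no nonzero runs, and A never emits an empty run elsewhere.
def D_split_by_zero (l : List Int) : Prop := l = []
instance (l : List Int) : Decidable (D_split_by_zero l) := by unfold D_split_by_zero; infer_instance
def Spec_split_by_zero (l : List Int) (out : List (List Int)) : Prop := ¬ D_split_by_zero l → out = split_by_zero_alt l
instance (l : List Int) (out : List (List Int)) : Decidable (Spec_split_by_zero l out) := by unfold Spec_split_by_zero; infer_instance
def pvDiffWitness_split_by_zero : List Int := []
def pvDiffWitnessOut_split_by_zero : (List (List Int)) × (List (List Int)) := ([[]], [])

-- ===== CLAIM (what is proved, stated in full; the proofs are below) =====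
def Claim_unchanged_split_by_zero : Prop := ∀ (l : List Int), Dom_split_by_zero l → Spec_split_by_zero l (split_by_zero l)
def Claim_changed_split_by_zero : Prop := Dom_split_by_zero (pvDiffWitness_split_by_zero) ∧ D_split_by_zero (pvDiffWitness_split_by_zero) ∧ split_by_zero (pvDiffWitness_split_by_zero) = pvDiffWitnessOut_split_by_zero.1 ∧ split_by_zero_alt (pvDiffWitness_split_by_zero) = pvDiffWitnessOut_split_by_zero.2 ∧ pvDiffWitnessOut_split_by_zero.1 ≠ pvDiffWitnessOut_split_by_zero.2
def Claim_exact_split_by_zero : Prop := ∀ (l : List Int), Dom_split_by_zero l → D_split_by_zero l → split_by_zero l ≠ split_by_zero_alt l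

-- ===== LEMMAS AND PROOFS =====

-- reference recursion: pvAux cur l = the runs of (cur ++ l), given cur is the currently open run
def pvAux : List Int → List Int → List (List Int)
  | cur, [] => if cur = [] then [] else [cur]
  | cur, x :: xs =>
      if x = 0 then (if cur = [] then pvAux [] xs else cur :: pvAux [] xs)
      else pvAux (cur ++ [x]) xs

theorem pvAux_fold (l : List Int) : ∀ (ret : List (List Int)) (cur : List Int),
    (let p := l.foldl
        (fun (p : List (List Int) × List Int) x =>
          if x = 0 then (if p.2 ≠ [] then (p.1 ++ [p.2], ([] : List Int)) else p)
          else (p.1, p.2 ++ [x]))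
        (ret, cur)
     if p.2 ≠ [] then p.1 ++ [p.2] else p.1) = ret ++ pvAux cur l := by
  induction l with
  | nil =>
    intro ret cur
    by_cases h : cur = [] <;> simp [pvAux, h]
  | cons x xs ih =>
    intro ret cur
    by_cases hx : x = 0
    · by_cases hc : cur = []
      · simpa [pvAux, hx, hc] using ih ret []
      · have := ih (ret ++ [cur]) []
        simp [pvAux, hx, hc, List.foldl_cons] at this ⊢
        simpa using this
    · have := ih ret (cur ++ [x])
      simp [pvAux, hx, List.foldl_cons] at this ⊢
      simpa using this

theorem pvAux_nozero (l : List Int) : ∀ (cur : List Int), (0 : Int) ∉ l →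
    pvAux cur l = if cur ++ l = [] then [] else [cur ++ l] := by
  induction l with
  | nil => intro cur _; simp [pvAux]
  | cons x xs ih =>
    intro cur h
    have hx : x ≠ 0 := fun hx0 => h (by simp [hx0])
    have hxs : (0 : Int) ∉ xs := fun hm => h (List.mem_cons_of_mem _ hm)
    simp [pvAux, hx, ih (cur ++ [x]) hxs]

theorem pvAux_split (pre : List Int) : ∀ (rest cur : List Int), (0 : Int) ∉ pre →
    pvAux cur (pre ++ 0 :: rest)
      = (if cur ++ pre = [] then [] else [cur ++ pre]) ++ pvAux [] rest := by
  induction pre with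
  | nil =>
    intro rest cur _
    by_cases hc : cur = [] <;> simp [pvAux, hc]
  | cons x xs ih =>
    intro rest cur h
    have hx : x ≠ 0 := fun hx0 => h (by simp [hx0])
    have hxs : (0 : Int) ∉ xs := fun hm => h (List.mem_cons_of_mem _ hm)
    simp [pvAux, hx, ih rest (cur ++ [x]) hxs]

theorem idxOf_decomp (l : List Int) (h : (0 : Int) ∈ l) :
    l = l.take (l.idxOf 0) ++ 0 :: l.drop (l.idxOf 0 + 1) ∧ (0 : Int) ∉ l.take (l.idxOf 0) := by
  induction l with
  | nil => cases h
  | cons x xs ih =>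
    by_cases hx : x = 0
    · subst hx; simp
    · have hm : (0 : Int) ∈ xs := by
        rcases List.mem_cons.mp h with h0 | h0
        · exact absurd h0.symm hx
        · exact h0
      have hidx : (x :: xs).idxOf 0 = xs.idxOf 0 + 1 := by
        simp [hx]
      obtain ⟨hdec, hnm⟩ := ih hm
      constructor
      · rw [hidx]
        simpa using congrArg (x :: ·) hdec
      · rw [hidx]
        intro hmem
        rcases List.mem_cons.mp (by simpa using hmem) with h0 | h0
        · exact hx h0.symm
        · exact hnm h0

theorem splitA_loop_eq (n : Nat) : ∀ (l : List Int), l.length ≤ n → ∀ (ret : List (List Int)),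
    splitA_loop l ret = ret ++ pvAux [] l := by
  induction n with
  | zero =>
    intro l hl ret
    have : l = [] := List.length_eq_zero_iff.mp (Nat.le_zero.mp hl)
    subst this
    simp [splitA_loop, pvAux]
  | succ n ih =>
    intro l hl ret
    by_cases h : (0 : Int) ∈ l
    · obtain ⟨hdec, hnm⟩ := idxOf_decomp l h
      have hpos : 0 < l.length := List.length_pos_iff.mpr (by intro hnil; simp [hnil] at h)
      have hlen : (l.drop (l.idxOf 0 + 1)).length ≤ n := by
        simp [List.length_drop]; omega
      rw [splitA_loop]
      simp only [h, dite_true]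
      rw [ih _ hlen]
      conv_rhs => rw [hdec]
      rw [pvAux_split _ _ _ hnm]
      by_cases ht : l.take (l.idxOf 0) = [] <;> simp [ht]
    · rw [splitA_loop]
      simp only [h, dite_false]
      rw [pvAux_nozero l [] h]
      by_cases hnil : l = [] <;> simp [hnil]

theorem alt_eq_aux (l : List Int) : split_by_zero_alt l = pvAux [] l := by
  have h := pvAux_fold l [] []
  simp only [List.nil_append] at h
  exact h

-- ===== VERDICT (by name: the statement is the Claim_ definition above) =====
theorem split_by_zero_spec : Claim_unchanged_split_by_zero := by
  intro l _ hd
  have hnil : l ≠ [] := hd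
  rw [alt_eq_aux, split_by_zero]
  by_cases h : (0 : Int) ∈ l
  · simp only [h, not_true_eq_false, ite_false]
    exact splitA_loop_eq l.length l le_rfl []
  · simp only [h, not_false_eq_true, ite_true]
    rw [pvAux_nozero l [] h]
    simp [hnil]

theorem split_by_zero_changed : Claim_changed_split_by_zero := by
  unfold Claim_changed_split_by_zero; decide

theorem split_by_zero_tight : Claim_exact_split_by_zero := by
  intro l _ hd
  subst hd
  decide
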